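-- pv_equiv track=rewrite | github.com/BroodLK/aa-discord-obfuscate | discord_obfuscate/obfuscation.py | _insert_dividers
-- ===== SOURCE A (Python) =====
-- import itertools
--
-- def _insert_dividers(value: str, dividers: list, min_chars: int) -> str:
--     if not dividers or min_chars <= 0:
--         return value
--     chunks = [value[i : i + min_chars] for i in range(0, len(value), min_chars)]
--     if len(chunks) <= 1:
--         return value
--     out = chunks[0]
--     for divider, chunk in zip(itertools.cycle(dividers), chunks[1:]):
--         out += divider + chunk
--     return out
-- ===== SOURCE B (Python) =====
-- def _insert_dividers(value: str, dividers: list, min_chars: int) -> str: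
--     if not dividers or min_chars <= 0 or len(value) <= min_chars:
--         return value
--     out = ""
--     for i, ch in enumerate(value):
--         out += ch
--         if (i + 1) % min_chars == 0 and i + 1 < len(value):
--             out += dividers[((i + 1) // min_chars - 1) % len(dividers)]
--     return out
-- ===== Notes on version B (the rewrite author's own statement) =====
-- stated objective: alternative
-- what changed: B drops the chunk list and itertools.cycle entirely: it makes a single pass over the characters, appending a divider (indexed by boundary number mod len(dividers)) whenever an interior chunk boundary is crossed.
import Mathlib
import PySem

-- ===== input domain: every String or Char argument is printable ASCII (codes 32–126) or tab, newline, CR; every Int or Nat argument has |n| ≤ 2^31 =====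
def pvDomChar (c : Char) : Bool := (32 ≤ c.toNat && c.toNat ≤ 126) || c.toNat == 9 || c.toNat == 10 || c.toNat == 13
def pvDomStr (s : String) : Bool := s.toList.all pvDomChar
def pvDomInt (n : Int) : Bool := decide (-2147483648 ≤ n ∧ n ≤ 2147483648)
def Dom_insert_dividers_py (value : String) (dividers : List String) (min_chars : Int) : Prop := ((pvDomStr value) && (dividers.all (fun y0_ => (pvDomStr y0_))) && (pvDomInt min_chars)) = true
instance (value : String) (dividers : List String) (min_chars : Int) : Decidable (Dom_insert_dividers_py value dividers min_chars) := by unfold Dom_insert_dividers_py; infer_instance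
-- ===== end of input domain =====

-- B replaces A's chunk list + itertools.cycle with a single pass over the characters,
-- emitting a divider at each interior chunk boundary (objective: alternative; same linear cost).

-- ===== PORT A =====
-- chunks = [value[i : i + min_chars] for i in range(0, len(value), min_chars)];
-- 'zip(itertools.cycle(dividers), chunks[1:])' is ported as enumerate(chunks[1:]) with
-- divider = dividers[k % len(dividers)] (exact: cycle yields the index-mod-length element).
def insert_dividers_py (value : String) (dividers : List String) (min_chars : Int) : String :=
  if dividers = [] ∨ min_chars ≤ 0 then value
  else
    let chunks : List String :=
      (PySem.List.pyRange 0 (PySem.Str.len value) min_chars).map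
        (fun i => PySem.Str.slice value (some i) (some (i + min_chars)))
    if chunks.length ≤ 1 then value
    else
      (PySem.List.enumerate (PySem.List.slice chunks (some 1) none) 0).foldl
        (fun out p =>
          out ++ PySem.List.pyGetD dividers (PySem.Int.mod p.1 (dividers.length : Int)) "" ++ p.2)
        (PySem.List.pyGetD chunks 0 "")

-- ===== PORT B =====
def insert_dividers_py_alt (value : String) (dividers : List String) (min_chars : Int) : String :=
  if dividers = [] ∨ min_chars ≤ 0 ∨ PySem.Str.len value ≤ min_chars then value
  else
    (PySem.List.enumerate value.toList 0).foldl
      (fun out p =>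
        let out := out ++ String.ofList [p.2]
        if PySem.Int.mod (p.1 + 1) min_chars = 0 ∧ p.1 + 1 < PySem.Str.len value then
          out ++ PySem.List.pyGetD dividers
            (PySem.Int.mod (PySem.Int.floordiv (p.1 + 1) min_chars - 1) (dividers.length : Int)) ""
        else out)
      ""

-- ===== PRECONDITION & SPEC =====
def Spec_insert_dividers_py (value : String) (dividers : List String) (min_chars : Int) (out : String) : Prop := out = insert_dividers_py_alt value dividers min_chars
instance (value : String) (dividers : List String) (min_chars : Int) (out : String) : Decidable (Spec_insert_dividers_py value dividers min_chars out) := by unfold Spec_insert_dividers_py; infer_instance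

-- ===== CLAIM (what is proved, stated in full; the proofs are below) =====
def Claim_equal_insert_dividers_py : Prop := ∀ (value : String) (dividers : List String) (min_chars : Int), Dom_insert_dividers_py value dividers min_chars → Spec_insert_dividers_py value dividers min_chars (insert_dividers_py value dividers min_chars)

-- ===== LEMMAS AND PROOFS =====

-- divider inserted after the k-th chunk (0-based)
def pvDivL (ds : List String) (k : Nat) : List Char := (ds.getD (k % ds.length) "").toList

-- the common closed form both ports are reduced to: chunk-wise interleave on List Char
def pvInterL (ds : List String) (m : Nat) (cs : List Char) (k : Nat) : List Char :=
  if _h : m = 0 ∨ cs.length ≤ m then cs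
  else cs.take m ++ pvDivL ds k ++ pvInterL ds m (cs.drop m) (k + 1)
  termination_by cs.length
  decreasing_by simp; omega

-- A's chunk list, recursively
def pvChunks (m : Nat) (cs : List Char) : List (List Char) :=
  if _h : m = 0 ∨ cs = [] then [] else cs.take m :: pvChunks m (cs.drop m)
  termination_by cs.length
  decreasing_by simp; cases cs <;> simp_all; omega

-- A's divider-then-chunk join over the chunk tail
def pvTail (ds : List String) (cl : List String) (k : Nat) : List Char :=
  match cl with
  | [] => []
  | c :: rest => pvDivL ds k ++ c.toList ++ pvTail ds rest (k + 1)

theorem pv_toList_foldl {α : Type} (f : String → α → String) (g : List Char → α → List Char)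
    (h : ∀ s a, (f s a).toList = g s.toList a) :
    ∀ (l : List α) (acc : String), (l.foldl f acc).toList = l.foldl g acc.toList := by
  intro l
  induction l with
  | nil => intro acc; rfl
  | cons x xs ih => intro acc; simp only [List.foldl_cons, ih, h]

theorem pv_chunks_closed (m : Nat) (hm : 0 < m) :
    ∀ (cs : List Char),
      pvChunks m cs = (List.range ((cs.length + m - 1) / m)).map
        (fun k => (cs.drop (m * k)).take m) := by
  intro cs
  induction hn : cs.length using Nat.strong_induction_on generalizing cs with
  | _ n ih =>
  subst hn
  by_cases hnil : cs = []
  · subst hnil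
    simp [pvChunks, Nat.div_eq_of_lt (show 0 + m - 1 < m by omega)]
    omega
  · rw [pvChunks]
    simp only [hm.ne', hnil, or_self, dif_neg, not_false_iff, false_or]
    have hlen : 0 < cs.length := List.length_pos_iff.mpr hnil
    have hq : (cs.length + m - 1) / m = ((cs.length - m) + m - 1) / m + 1 := by
      by_cases h : cs.length ≤ m
      · have h1 : (cs.length + m - 1) / m = 1 := by
          rw [Nat.div_eq_of_lt_le] <;> omega
        have h2 : ((cs.length - m) + m - 1) / m = 0 := Nat.div_eq_of_lt (by omega)
        omega
      · have h' : m < cs.length := by omega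
        have : cs.length + m - 1 = ((cs.length - m) + m - 1) + m := by omega
        rw [this, Nat.add_div_right _ hm]
    rw [hq, List.range_succ_eq_map]
    simp only [List.map_cons, Nat.mul_zero, List.drop_zero, List.map_map]
    congr 1
    rw [ih (cs.drop m).length (by simp; omega) (cs.drop m) rfl]
    simp only [List.length_drop, List.map_map]
    apply List.map_congr_left
    intro k _
    simp only [Function.comp_apply, List.drop_drop]
    congr 2
    rw [Nat.succ_eq_add_one, Nat.mul_add, Nat.mul_one, Nat.add_comm]

theorem pv_foldA (ds : List String) (hd : ds ≠ []) :
    ∀ (cl : List String) (k : Nat) (acc : String),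
      ((PySem.List.enumerate cl (k : Int)).foldl
        (fun out p =>
          out ++ PySem.List.pyGetD ds (PySem.Int.mod p.1 (ds.length : Int)) "" ++ p.2) acc).toList
      = acc.toList ++ pvTail ds cl k := by
  intro cl
  induction cl with
  | nil => intro k acc; simp [PySem.List.enumerate, pvTail]
  | cons c rest ih =>
    intro k acc
    have hdl : 0 < ds.length := List.length_pos_of_ne_nil hd
    rw [PySem.List.enumerate_cons]
    have : ((k : Int) + 1) = ((k + 1 : Nat) : Int) := by push_cast; ring
    rw [List.foldl_cons, this, ih]
    simp [pvTail, PySem.Int.mod_eq_emod_of_pos (by exact_mod_cast hdl : (0:Int) < (ds.length:Int)), pvDivL]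
    rw [← Int.natCast_emod, PySem.List.pyGetD_natCast]
    simp

theorem pv_interL_eq (ds : List String) (m : Nat) (hm : 0 < m) :
    ∀ (cs : List Char) (k : Nat), cs ≠ [] →
      cs.take m ++ pvTail ds ((pvChunks m (cs.drop m)).map String.ofList) k = pvInterL ds m cs k := by
  intro cs
  induction hn : cs.length using Nat.strong_induction_on generalizing cs with
  | _ n ih =>
  subst hn
  intro k hnil
  by_cases hlm : cs.length ≤ m
  · have hdrop : cs.drop m = [] := by simp [List.drop_eq_nil_iff]; omega
    rw [hdrop, pvChunks, pvInterL]
    simp only [dif_pos (Or.inr rfl), dif_pos (Or.inr hlm), List.map_nil]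
    simp [pvTail, List.take_of_length_le hlm]
  · rw [pvChunks, pvInterL]
    have hd2 : cs.drop m ≠ [] := by simp [List.drop_eq_nil_iff]; omega
    rw [dif_neg (by push_neg; exact ⟨hm.ne', hd2⟩), dif_neg (by push_neg; omega)]
    rw [List.map_cons]
    show cs.take m ++ (pvDivL ds k ++ (String.ofList ((cs.drop m).take m)).toList ++ _) = _
    rw [String.toList_ofList]
    have := ih (cs.drop m).length (by simp; omega) (cs.drop m) rfl (k + 1) hd2
    rw [← this]
    simp [List.append_assoc]

theorem pv_nodiv (ds : List String) (m n : Nat) :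
    ∀ (cs : List Char) (s : Int) (acc : List Char),
      (∀ p ∈ PySem.List.enumerate cs s, ¬(PySem.Int.mod (p.1 + 1) (m : Int) = 0 ∧ p.1 + 1 < (n : Int))) →
      (PySem.List.enumerate cs s).foldl
        (fun out p =>
          let out := out ++ [p.2]
          if PySem.Int.mod (p.1 + 1) (m : Int) = 0 ∧ p.1 + 1 < (n : Int) then
            out ++ (PySem.List.pyGetD ds
              (PySem.Int.mod (PySem.Int.floordiv (p.1 + 1) (m : Int) - 1) (ds.length : Int)) "").toList
          else out) acc
      = acc ++ cs := by
  intro cs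
  induction cs with
  | nil => intro s acc _; simp [PySem.List.enumerate]
  | cons c rest ih =>
    intro s acc h
    rw [PySem.List.enumerate_cons, List.foldl_cons]
    show (PySem.List.enumerate rest (s+1)).foldl _ (if _ then _ else acc ++ [c]) = _
    rw [if_neg (h (s, c) (by rw [PySem.List.enumerate_cons]; exact List.mem_cons_self))]
    rw [ih (s+1) (acc ++ [c]) (fun p hp => h p (by rw [PySem.List.enumerate_cons]; exact List.mem_cons_of_mem _ hp))]
    simp

theorem pv_foldB (ds : List String) (hd : ds ≠ []) (m : Nat) (hm : 0 < m) (n : Nat) :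
    ∀ (cs : List Char) (k : Nat) (acc : List Char), k * m + cs.length = n →
      (PySem.List.enumerate cs ((k * m : Nat) : Int)).foldl
        (fun out p =>
          let out := out ++ [p.2]
          if PySem.Int.mod (p.1 + 1) (m : Int) = 0 ∧ p.1 + 1 < (n : Int) then
            out ++ (PySem.List.pyGetD ds
              (PySem.Int.mod (PySem.Int.floordiv (p.1 + 1) (m : Int) - 1) (ds.length : Int)) "").toList
          else out) acc
      = acc ++ pvInterL ds m cs k := by
  intro cs
  induction hn : cs.length using Nat.strong_induction_on generalizing cs with
  | _ len ih =>
  subst hn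
  intro k acc hkn
  have hmz : (0 : Int) < (m : Int) := by exact_mod_cast hm
  by_cases hlm : cs.length ≤ m
  · rw [pvInterL, dif_pos (Or.inr hlm)]
    apply pv_nodiv
    intro p hp
    rw [PySem.List.mem_enumerate_iff] at hp
    obtain ⟨j, hj, rfl⟩ := hp
    rintro ⟨h1, h2⟩
    rw [PySem.Int.mod_eq_emod_of_pos hmz] at h1
    have hdvd : (m : Int) ∣ ((k * m : Nat) : Int) + (j : Int) + 1 := Int.dvd_of_emod_eq_zero h1
    have hdvd2 : (m : Int) ∣ ((j + 1 : Nat) : Int) := by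
      have heq : ((j + 1 : Nat) : Int) = (((k * m : Nat) : Int) + (j : Int) + 1) - (k : Int) * (m : Int) := by
        push_cast; ring
      rw [heq]
      exact dvd_sub hdvd (dvd_mul_left _ _)
    have hmle : m ≤ j + 1 := Nat.le_of_dvd (by omega) (Int.natCast_dvd_natCast.mp hdvd2)
    have h2' : k * m + j + 1 < n := by push_cast at h2; exact_mod_cast h2
    omega
  · push_neg at hlm
    have hm1 : m - 1 < cs.length := by omega
    have e2 : cs.take m = cs.take (m - 1) ++ [cs[m - 1]] := by
      conv_lhs => rw [show m = (m - 1) + 1 by omega]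
      rw [List.take_succ, List.getElem?_eq_getElem hm1]
      rfl
    conv_lhs => rw [show cs = cs.take m ++ cs.drop m from (List.take_append_drop m cs).symm, e2]
    rw [List.append_assoc, PySem.List.enumerate_append, List.foldl_append]
    rw [pv_nodiv ds m n _ _ acc ?side, PySem.List.enumerate_append, List.foldl_append]
    case side =>
      intro p hp
      rw [PySem.List.mem_enumerate_iff] at hp
      obtain ⟨j, hj, rfl⟩ := hp
      rintro ⟨h1, -⟩
      rw [PySem.Int.mod_eq_emod_of_pos hmz] at h1
      have hdvd : (m : Int) ∣ ((k * m : Nat) : Int) + (j : Int) + 1 := Int.dvd_of_emod_eq_zero h1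
      have hdvd2 : (m : Int) ∣ ((j + 1 : Nat) : Int) := by
        have heq : ((j + 1 : Nat) : Int) = (((k * m : Nat) : Int) + (j : Int) + 1) - (k : Int) * (m : Int) := by
          push_cast; ring
        rw [heq]
        exact dvd_sub hdvd (dvd_mul_left _ _)
      have hmle : m ≤ j + 1 := Nat.le_of_dvd (by omega) (Int.natCast_dvd_natCast.mp hdvd2)
      simp at hj
      omega
    · rw [PySem.List.enumerate_cons, PySem.List.enumerate_nil, List.foldl_cons, List.foldl_nil]
      have hlen1 : ((cs.take (m-1)).length : Int) = ((m : Int) - 1) := by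
        simp [List.length_take]
        omega
      have hstart : ((k * m : Nat) : Int) + ((cs.take (m-1)).length : Int) + 1 = ((k+1 : Int)) * (m : Int) := by
        rw [hlen1]; push_cast; ring
      show (PySem.List.enumerate _ _).foldl _ (if _ then _ else _) = _
      rw [if_pos ?cond]
      case cond =>
        constructor
        · rw [hstart, PySem.Int.mod_eq_emod_of_pos hmz]
          exact Int.mul_emod_left _ _
        · rw [hstart]
          have : ((k+1 : Int)) * (m : Int) = (((k+1) * m : Nat) : Int) := by push_cast; ring
          rw [this]
          have : (k+1) * m < n := by
            have : (k+1)*m = k*m + m := by ring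
            omega
          exact_mod_cast this
      have hdiv : PySem.Int.mod (PySem.Int.floordiv (((k * m : Nat) : Int) + ((cs.take (m-1)).length : Int) + 1) (m : Int) - 1) (ds.length : Int)
          = ((k % ds.length : Nat) : Int) := by
        rw [hstart, PySem.Int.floordiv_eq_ediv_of_pos hmz, Int.mul_ediv_cancel _ (by omega)]
        rw [PySem.Int.mod_eq_emod_of_pos (by exact_mod_cast List.length_pos_of_ne_nil hd : (0:Int) < (ds.length : Int))]
        rw [show ((k:Int) + 1 - 1) = ((k : Nat) : Int) by ring]
        rw [← Int.natCast_emod]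
      rw [hdiv, PySem.List.pyGetD_natCast]
      have hstart3 : ((k * m : Nat) : Int) + ((cs.take (m-1)).length : Int) + ((1 : Nat) : Int) = (((k+1) * m : Nat) : Int) := by
        rw [hlen1]; push_cast; ring
      simp only [List.length_cons, List.length_nil, Nat.zero_add]
      rw [hstart3]
      rw [ih (cs.drop m).length (by simp; omega) (cs.drop m) rfl (k+1) _ (by simp; omega)]
      rw [show pvInterL ds m cs k = cs.take m ++ pvDivL ds k ++ pvInterL ds m (cs.drop m) (k + 1) from by
        rw [pvInterL, dif_neg (by push_neg; exact ⟨hm.ne', by omega⟩)]]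
      rw [e2]
      simp [pvDivL, List.append_assoc]

theorem pv_main (value : String) (dividers : List String) (min_chars : Int) :
    insert_dividers_py value dividers min_chars = insert_dividers_py_alt value dividers min_chars := by
  unfold insert_dividers_py insert_dividers_py_alt
  by_cases hg : dividers = [] ∨ min_chars ≤ 0
  · rw [if_pos hg, if_pos (by tauto)]
  · push_neg at hg
    obtain ⟨hdne, hmc⟩ := hg
    obtain ⟨m, rfl⟩ : ∃ m : Nat, min_chars = (m : Int) :=
      ⟨min_chars.toNat, (Int.toNat_of_nonneg (by omega)).symm⟩
    have hm : 0 < m := by exact_mod_cast hmc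
    have hmz : (0 : Int) < (m : Int) := by exact_mod_cast hm
    rw [if_neg (by push_neg; exact ⟨hdne, by omega⟩)]
    set cs : List Char := value.toList with hcs
    set n : Nat := cs.length with hn
    have hlen : PySem.Str.len value = (n : Int) := by rw [PySem.Str.len_eq]
    have hq :
        (PySem.List.pyRange 0 (PySem.Str.len value) (m : Int)).map
            (fun i => PySem.Str.slice value (some i) (some (i + (m : Int))))
          = (List.range ((n + m - 1) / m)).map
              (fun k => String.ofList ((cs.drop (m * k)).take m)) := by
      rw [hlen, PySem.List.pyRange_of_pos _ _ hmz, List.map_map]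
      have hqn : (if (0:Int) < (n:Int) then (((n : Int) - 0 + (m : Int) - 1) / (m : Int)).toNat else 0)
          = (n + m - 1) / m := by
        by_cases h0 : n = 0
        · rw [h0]
          rw [if_neg (by simp)]
          exact (Nat.div_eq_of_lt (by omega)).symm
        · rw [if_pos (by exact_mod_cast Nat.pos_of_ne_zero h0)]
          have : ((n : Int) - 0 + (m : Int) - 1) = ((n + m - 1 : Nat) : Int) := by push_cast; omega
          rw [this, ← Int.natCast_div, Int.toNat_natCast]
      rw [hqn]
      apply List.map_congr_left
      intro k _
      apply String.toList_inj.mp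
      rw [String.toList_ofList]
      have h1 : (0 : Int) + (m : Int) * (k : Int) = ((m * k : Nat) : Int) := by push_cast; ring
      simp only [Function.comp_apply, PySem.Str.toList_slice, h1, hcs,
        PySem.Chars.slice_eq_listSlice, PySem.List.slice_natCast_add]
    by_cases hnm : n ≤ m
    · have hag : ((PySem.List.pyRange 0 (PySem.Str.len value) (m : Int)).map
          (fun i => PySem.Str.slice value (some i) (some (i + (m : Int))))).length ≤ 1 := by
        rw [hq]
        simp only [List.length_map, List.length_range]
        have := Nat.div_lt_of_lt_mul (by omega : n + m - 1 < m * 2)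
        omega
      have hbg : dividers = [] ∨ (m : Int) ≤ 0 ∨ PySem.Str.len value ≤ (m : Int) := by
        right; right; rw [hlen]; exact_mod_cast hnm
      rw [if_pos hag, if_pos hbg]
    · push_neg at hnm
      have hcne : cs ≠ [] := by
        intro h; rw [h] at hn; simp [hn] at hnm
      have hag : ¬ ((PySem.List.pyRange 0 (PySem.Str.len value) (m : Int)).map
          (fun i => PySem.Str.slice value (some i) (some (i + (m : Int))))).length ≤ 1 := by
        rw [hq]
        simp only [List.length_map, List.length_range]
        have h2q : 2 ≤ (n + m - 1) / m := by
          apply Nat.le_div_iff_mul_le hm |>.mpr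
          omega
        omega
      have hbg : ¬ (dividers = [] ∨ (m : Int) ≤ 0 ∨ PySem.Str.len value ≤ (m : Int)) := by
        push_neg
        refine ⟨hdne, by omega, by rw [hlen]; exact_mod_cast hnm⟩
      rw [if_neg hag, if_neg hbg]
      -- main case
      apply String.toList_inj.mp
      have hchunks : pvChunks m cs = cs.take m :: pvChunks m (cs.drop m) := by
        rw [pvChunks, dif_neg (by push_neg; exact ⟨hm.ne', hcne⟩)]
      have hmapped :
          (List.range ((n + m - 1) / m)).map (fun k => String.ofList ((cs.drop (m * k)).take m))
            = (pvChunks m cs).map String.ofList := by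
        rw [pv_chunks_closed m hm cs, List.map_map]
        rfl
      rw [hq, hmapped]
      have htail : PySem.List.slice ((pvChunks m cs).map String.ofList) (some 1) none
          = (pvChunks m (cs.drop m)).map String.ofList := by
        rw [PySem.List.slice_from_one, hchunks]
        rfl
      have hhead : PySem.List.pyGetD ((pvChunks m cs).map String.ofList) 0 ""
          = String.ofList (cs.take m) := by
        rw [hchunks]
        simp [PySem.List.pyGetD, PySem.List.pyIdx?, PySem.List.pyGet?]
      rw [htail, hhead]
      rw [show (0 : Int) = ((0 : Nat) : Int) by simp]
      rw [pv_foldA dividers hdne _ 0 _]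
      rw [String.toList_ofList]
      rw [pv_interL_eq dividers m hm cs 0 hcne]
      -- B side
      rw [pv_toList_foldl _
        (fun out p =>
          let o := out ++ [p.2]
          if PySem.Int.mod (p.1 + 1) (m : Int) = 0 ∧ p.1 + 1 < (n : Int) then
            o ++ (PySem.List.pyGetD dividers
              (PySem.Int.mod (PySem.Int.floordiv (p.1 + 1) (m : Int) - 1) (dividers.length : Int)) "").toList
          else o)
        ?hfg]
      case hfg =>
        intro s a
        rw [hlen]
        by_cases hC : PySem.Int.mod (a.1 + 1) (m : Int) = 0 ∧ a.1 + 1 < (n : Int) <;>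
          simp [hC, String.toList_append]
      have hfb := pv_foldB dividers hdne m hm n cs 0 [] (by omega)
      rw [show ((0 * m : Nat) : Int) = (0 : Int) by simp] at hfb
      simp only [List.nil_append] at hfb
      exact hfb.symm

-- ===== VERDICT (by name: the statement is the Claim_ definition above) =====
theorem insert_dividers_py_spec : Claim_equal_insert_dividers_py := by
  intro value dividers min_chars _
  unfold Spec_insert_dividers_py
  exact pv_main value dividers min_chars
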